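-- pv_equiv track=rewrite | github.com/mtczech/fetch_data_takehome_test | utils.py | version_to_int
-- ===== SOURCE A (Python) =====
-- def version_to_int(version):
--     version_vals_list = version.split(".")
--     version_vals_list = [int(x) for x in version_vals_list]
--     index = 0
--     for i in range(-1, -1 * (len(version_vals_list) + 1), -1):
--         version_vals_list[i] = (version_vals_list[i]+1 << 8*index) & (0x000000FF << 8*index)
--         index += 1
--     returned = 0
--     for val in version_vals_list:
--         returned = returned | val
--     return int(returned)
-- ===== SOURCE B (Python) =====
-- def version_to_int(version):
--     result = 0
--     for part in version.split("."):
--         result = result * 256 + ((int(part) + 1) % 256)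
--     return result
-- ===== Notes on version B (the rewrite author's own statement) =====
-- stated objective: simpler
-- what changed: B replaces A's reversed negative-index positioning pass (shift each byte into place and mask) followed by a separate OR-reduction pass with a single left-to-right fold that keeps one running accumulator: result = result*256 + ((int(part)+1) % 256).
import Mathlib
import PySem

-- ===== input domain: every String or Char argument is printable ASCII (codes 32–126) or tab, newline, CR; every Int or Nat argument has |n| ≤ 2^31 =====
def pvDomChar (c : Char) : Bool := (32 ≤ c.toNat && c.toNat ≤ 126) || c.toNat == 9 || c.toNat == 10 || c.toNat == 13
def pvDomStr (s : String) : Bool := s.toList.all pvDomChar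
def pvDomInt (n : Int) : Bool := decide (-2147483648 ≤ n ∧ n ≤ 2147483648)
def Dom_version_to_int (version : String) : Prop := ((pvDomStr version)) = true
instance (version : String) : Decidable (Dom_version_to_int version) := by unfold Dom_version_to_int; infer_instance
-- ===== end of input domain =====

-- B replaces A's reversed negative-index shift-and-mask pass plus a second OR pass by one
-- left-to-right fold carrying a running accumulator (result*256 + (int(part)+1) % 256).

-- ===== PORT A =====
def version_to_int (version : String) : Int :=
  let vals : List Int :=
    ((PySem.Str.split? version ".").getD []).map (fun x => (PySem.Int.ofStr? x).getD 0)
  let st := (PySem.List.pyRange (-1) (-1 * (PySem.List.len vals + 1)) (-1)).foldl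
      (fun (st : List Int × Int) i =>
        (PySem.List.pySetD st.1 i
           (PySem.Int.band ((PySem.List.pyGetD st.1 i 0 + 1) <<< (8 * st.2).toNat)
                           (0x000000FF <<< (8 * st.2).toNat)),
         st.2 + 1))
      (vals, 0)
  st.1.foldl (fun acc val => PySem.Int.bor acc val) 0

-- ===== PORT B =====
def version_to_int_alt (version : String) : Int :=
  ((PySem.Str.split? version ".").getD []).foldl
    (fun result part => result * 256 + PySem.Int.mod ((PySem.Int.ofStr? part).getD 0 + 1) 256) 0

-- ===== PRECONDITION & SPEC =====
-- Pre_ excludes exactly the inputs where Python's int(part) raises ValueError for some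
-- dot-separated part (e.g. an empty or non-numeric part); A returns on all other inputs.
def Pre_version_to_int (version : String) : Prop :=
  ∀ p ∈ (PySem.Str.split? version ".").getD [], (PySem.Int.ofStr? p).isSome = true
instance (version : String) : Decidable (Pre_version_to_int version) := by
  unfold Pre_version_to_int; infer_instance
def pvWitness_version_to_int : String := "1.2.3"
def Spec_version_to_int (version : String) (out : Int) : Prop := out = version_to_int_alt version
instance (version : String) (out : Int) : Decidable (Spec_version_to_int version out) := by
  unfold Spec_version_to_int; infer_instance

-- ===== CLAIM (what is proved, stated in full; the proofs are below) =====
def Claim_equal_version_to_int : Prop := ∀ (version : String), Dom_version_to_int version → Pre_version_to_int version → Spec_version_to_int version (version_to_int version)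

-- ===== LEMMAS AND PROOFS =====

-- the value A writes into slot of byte-index k (x is the parsed component there)
def pvG (k : Nat) (x : Int) : Int :=
  PySem.Int.band ((x + 1) <<< (8 * k)) (255 <<< (8 * k))

-- A's final list, rebuilt from the REVERSED component list (last component first, byte-index k)
def pvProcRev : List Int → Nat → List Int
  | [], _ => []
  | v :: r, k => pvProcRev r (k + 1) ++ [pvG k v]

-- B's accumulator value, read off the reversed component list
def pvAcc : List Int → Int
  | [] => 0
  | v :: r => pvAcc r * 256 + PySem.Int.mod (v + 1) 256

lemma pvAcc_nonneg (rs : List Int) : 0 ≤ pvAcc rs := by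
  induction rs with
  | nil => simp [pvAcc]
  | cons v r ih =>
    have h := PySem.Int.mod_nonneg (v + 1) (b := 256) (by norm_num)
    simp only [pvAcc]; nlinarith

lemma natMask (A s : Nat) : (A * 2 ^ s) &&& (255 * 2 ^ s) = (A % 256) * 2 ^ s := by
  have h := Nat.shiftLeft_and_distrib (i := s) (a := A) (b := 255)
  have h2 : A &&& 255 = A % 256 := by
    have := Nat.and_two_pow_sub_one_eq_mod A 8
    norm_num at this; simp_all
  simp only [Nat.shiftLeft_eq, h2] at h
  omega

lemma natMaskNeg (u s : Nat) (hu : 1 ≤ u) :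
    (255 * 2 ^ s) &&& (u * 2 ^ s - 1) = ((u - 1) % 256) * 2 ^ s := by
  have hsplit : u * 2 ^ s - 1 = (u - 1) * 2 ^ s + (2 ^ s - 1) := by
    have h2 : 1 ≤ 2 ^ s := Nat.one_le_two_pow
    have : u * 2 ^ s = (u - 1) * 2 ^ s + 2 ^ s := by
      rw [Nat.sub_mul, one_mul]
      have : 2 ^ s ≤ u * 2 ^ s := Nat.le_mul_of_pos_left _ (by omega)
      omega
    omega
  have hor : (u - 1) * 2 ^ s + (2 ^ s - 1) = ((u - 1) * 2 ^ s) ||| (2 ^ s - 1) := by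
    have := Nat.shiftLeft_add_eq_or_of_lt (i := s) (b := 2 ^ s - 1)
      (by have : 1 ≤ 2 ^ s := Nat.one_le_two_pow; omega) (u - 1)
    simpa [Nat.shiftLeft_eq] using this
  rw [hsplit, hor, Nat.and_or_distrib_left]
  have hA : (255 * 2 ^ s) &&& ((u - 1) * 2 ^ s) = ((u - 1) % 256) * 2 ^ s := by
    rw [Nat.and_comm]; exact natMask (u - 1) s
  have hB : (255 * 2 ^ s) &&& (2 ^ s - 1) = 0 := by
    simp [Nat.and_two_pow_sub_one_eq_mod, Nat.mul_mod_left]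
  rw [hA, hB, Nat.or_zero]

lemma pvG_eq (k : Nat) (v : Int) :
    pvG k v = PySem.Int.mod (v + 1) 256 * 2 ^ (8 * k) := by
  rw [PySem.Int.mod_eq_emod_of_pos (by norm_num)]
  unfold pvG
  have h255 : ((255 <<< (8 * k) : Nat) : Int) = ((255 * 2 ^ (8 * k) : Nat) : Int) := by
    rw [Nat.shiftLeft_eq]
  rcases le_or_gt 0 (v + 1) with hw | hw
  · obtain ⟨A, hA⟩ := Int.eq_ofNat_of_zero_le hw
    rw [hA, Int.shiftLeft_eq, h255]
    have e1 : ((A : Int) * 2 ^ (8 * k)) = ((A * 2 ^ (8 * k) : Nat) : Int) := by push_cast; ring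
    rw [e1, PySem.Int.band_natCast, natMask]
    push_cast
    ring
  · set s := 8 * k with hs
    set u : Nat := (-(v + 1)).toNat with hudef
    have hu : 1 ≤ u := by omega
    have hv : v + 1 = -(u : Int) := by omega
    rw [hv, Int.shiftLeft_eq, h255]
    have hneg : ¬ (0 : Int) ≤ -(u : Int) * 2 ^ s := by
      have h2 : (0 : Int) < 2 ^ s := by positivity
      have : (0 : Int) < (u : Int) := by exact_mod_cast hu
      nlinarith
    have hpos : (0 : Int) ≤ ((255 * 2 ^ s : Nat) : Int) := Int.natCast_nonneg _
    simp only [PySem.Int.band, hneg, hpos, if_true, if_false]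
    have h1 : 1 ≤ u * 2 ^ s := Nat.one_le_iff_ne_zero.mpr (by positivity)
    have ht2 : (-(-(u : Int) * 2 ^ s) - 1).toNat = u * 2 ^ s - 1 := by
      have : (-(-(u : Int) * 2 ^ s) - 1) = ((u * 2 ^ s - 1 : Nat) : Int) := by
        push_cast [h1]; ring
      rw [this, Int.toNat_natCast]
    rw [Int.toNat_natCast, ht2, natMaskNeg u s hu]
    have hsub : (u - 1) % 256 ≤ 255 := by omega
    have hmod : ((255 - (u - 1) % 256 : Nat) : Int) = (-(u : Int)) % 256 := by omega
    have hle : (u - 1) % 256 * 2 ^ s ≤ 255 * 2 ^ s := Nat.mul_le_mul_right _ (by omega)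
    have hstep : 255 * 2 ^ s - (u - 1) % 256 * 2 ^ s = (255 - (u - 1) % 256) * 2 ^ s :=
      (Nat.sub_mul 255 ((u - 1) % 256) (2 ^ s)).symm
    rw [hstep]
    push_cast
    rw [hmod]

-- OR of a high part (multiple of 2^(8k+8)) and one fresh byte at 2^(8k) is addition
lemma bor_byte (a c : Int) (k : Nat) (ha : 0 ≤ a) (hc0 : 0 ≤ c) (hc : c < 256) :
    PySem.Int.bor (a * 2 ^ (8 * (k + 1))) (c * 2 ^ (8 * k)) = (a * 256 + c) * 2 ^ (8 * k) := by
  obtain ⟨A, rfl⟩ := Int.eq_ofNat_of_zero_le ha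
  obtain ⟨C, rfl⟩ := Int.eq_ofNat_of_zero_le hc0
  have hC : C < 256 := by exact_mod_cast hc
  have e1 : ((A : Int) * 2 ^ (8 * (k + 1))) = ((A * 2 ^ (8 * (k + 1)) : Nat) : Int) := by
    push_cast; ring
  have e2 : ((C : Int) * 2 ^ (8 * k)) = ((C * 2 ^ (8 * k) : Nat) : Int) := by push_cast; ring
  rw [e1, e2, PySem.Int.bor_natCast]
  have hnat : (A * 2 ^ (8 * (k + 1))) ||| (C * 2 ^ (8 * k)) = (A * 256 + C) * 2 ^ (8 * k) := by
    have h1 : A * 2 ^ (8 * (k + 1)) = (A <<< 8) <<< (8 * k) := by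
      rw [← Nat.shiftLeft_add]
      simp only [Nat.shiftLeft_eq]
      ring
    have h2 : C * 2 ^ (8 * k) = C <<< (8 * k) := by rw [Nat.shiftLeft_eq]
    rw [h1, h2, ← Nat.shiftLeft_or_distrib]
    have h3 : (A <<< 8) ||| C = A <<< 8 + C :=
      (Nat.shiftLeft_add_eq_or_of_lt (by norm_num [hC]) A).symm
    rw [h3]
    simp only [Nat.shiftLeft_eq]
  rw [hnat]
  push_cast
  ring

-- the OR pass over A's processed list computes B's accumulator, shifted by 8k bits
lemma foldl_bor_procRev (rs : List Int) (k : Nat) :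
    (pvProcRev rs k).foldl (fun acc val => PySem.Int.bor acc val) 0 = pvAcc rs * 2 ^ (8 * k) := by
  induction rs generalizing k with
  | nil => simp [pvProcRev, pvAcc]
  | cons v r ih =>
    simp only [pvProcRev, List.foldl_append, ih (k + 1), List.foldl_cons, List.foldl_nil]
    rw [pvG_eq]
    rw [bor_byte _ _ _ (pvAcc_nonneg r) (PySem.Int.mod_nonneg _ (by norm_num))
      (PySem.Int.mod_lt _ (by norm_num))]
    simp [pvAcc]

lemma pyGetD_neg_append (zs tail : List Int) (v : Int) (k : Nat) (h : tail.length = k) :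
    PySem.List.pyGetD (zs ++ v :: tail) (-(k : Int) - 1) 0 = v := by
  have hlen : (zs ++ v :: tail).length = zs.length + 1 + k := by simp [h]; omega
  simp only [PySem.List.pyGetD, PySem.List.pyGet?, PySem.List.pyIdx?, hlen]
  have h1 : ¬ (0 : Int) ≤ -(k : Int) - 1 := by omega
  have h2 : -((zs.length + 1 + k : Nat) : Int) ≤ -(k : Int) - 1 := by push_cast; omega
  rw [if_neg h1, if_pos h2]
  have h3 : zs.length + 1 + k - (-(-(k : Int) - 1)).toNat = zs.length := by omega
  rw [h3]
  simp

lemma pySetD_neg_append (zs tail : List Int) (v w : Int) (k : Nat) (h : tail.length = k) :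
    PySem.List.pySetD (zs ++ v :: tail) (-(k : Int) - 1) w = zs ++ w :: tail := by
  have hlen : (zs ++ v :: tail).length = zs.length + 1 + k := by simp [h]; omega
  simp only [PySem.List.pySetD, PySem.List.pySet?, PySem.List.pyIdx?, hlen]
  have h1 : ¬ (0 : Int) ≤ -(k : Int) - 1 := by omega
  have h2 : -((zs.length + 1 + k : Nat) : Int) ≤ -(k : Int) - 1 := by push_cast; omega
  rw [if_neg h1, if_pos h2]
  have h3 : zs.length + 1 + k - (-(-(k : Int) - 1)).toNat = zs.length := by omega
  rw [h3]
  simp only [Option.map_some, Option.getD_some]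
  rw [List.set_append_right _ _ (by omega)]
  simp

-- A's indexed write-back loop, characterised: processing the range [-(k+1) .. -(k+1)-|ys|]
-- on ys ++ tail (|tail| = k already processed) rewrites exactly ys, back to front
lemma loop_char (ys : List Int) : ∀ (tail : List Int) (k : Nat), tail.length = k →
    (PySem.List.pyRange (-(k : Int) - 1) (-(k : Int) - 1 - ys.length) (-1)).foldl
      (fun (st : List Int × Int) i =>
        (PySem.List.pySetD st.1 i
           (PySem.Int.band ((PySem.List.pyGetD st.1 i 0 + 1) <<< (8 * st.2).toNat)
                           (0x000000FF <<< (8 * st.2).toNat)),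
         st.2 + 1))
      (ys ++ tail, (k : Int))
    = (pvProcRev ys.reverse k ++ tail, (k : Int) + ys.length) := by
  induction ys using List.reverseRecOn with
  | nil =>
    intro tail k h
    rw [PySem.List.pyRange_neg_one_eq_nil (by simp)]
    simp [pvProcRev]
  | append_singleton zs v ih =>
    intro tail k h
    have hlen : ((zs ++ [v]).length : Int) = (zs.length : Int) + 1 := by simp
    rw [PySem.List.pyRange_neg_one_cons (by rw [hlen]; omega)]
    rw [List.foldl_cons]
    have hassoc : (zs ++ [v]) ++ tail = zs ++ v :: tail := by simp
    rw [hassoc, pyGetD_neg_append zs tail v k h, pySetD_neg_append zs tail v _ k h]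
    have hsh : (8 * (k : Int)).toNat = 8 * k := by omega
    have hstep : PySem.Int.band ((v + 1) <<< (8 * (k : Int)).toNat)
        (0x000000FF <<< (8 * (k : Int)).toNat) = pvG k v := by
      rw [hsh]; rfl
    rw [hstep]
    have hrange : -(k : Int) - 1 - 1 = -((k + 1 : Nat) : Int) - 1 := by push_cast; ring
    have hrange2 : -(k : Int) - 1 - ((zs ++ [v]).length : Int)
        = -((k + 1 : Nat) : Int) - 1 - (zs.length : Int) := by rw [hlen]; push_cast; ring_nf
    rw [hrange, hrange2]
    have hk : (k : Int) + 1 = ((k + 1 : Nat) : Int) := by push_cast; ring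
    rw [hk]
    rw [ih (pvG k v :: tail) (k + 1) (by simp [h])]
    simp only [Prod.mk.injEq]
    refine ⟨by simp [pvProcRev], by push_cast; simp; ring⟩

-- B's left fold over the components equals pvAcc of the reversed component list
lemma foldl_acc_eq (ys : List Int) :
    ys.foldl (fun result val => result * 256 + PySem.Int.mod (val + 1) 256) 0
      = pvAcc ys.reverse := by
  induction ys using List.reverseRecOn with
  | nil => simp [pvAcc]
  | append_singleton zs v ih =>
    simp only [List.foldl_append, List.foldl_cons, List.foldl_nil, List.reverse_append,
      List.reverse_cons, List.reverse_nil, List.nil_append, List.singleton_append, ih, pvAcc]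

-- ===== VERDICT (by name: the statement is the Claim_ definition above) =====
theorem version_to_int_spec : Claim_equal_version_to_int := by
  intro version _ _
  unfold Spec_version_to_int version_to_int version_to_int_alt
  dsimp only
  set parts := (PySem.Str.split? version ".").getD [] with hparts
  set vals : List Int := parts.map (fun x => (PySem.Int.ofStr? x).getD 0) with hvals
  have hL := loop_char vals [] 0 rfl
  simp only [Nat.cast_zero, neg_zero, zero_sub, List.append_nil, zero_add] at hL
  have hr : -1 * (PySem.List.len vals + 1) = -1 - (vals.length : Int) := by
    simp [pysem]; ring
  rw [hr, hL, foldl_bor_procRev, ← foldl_acc_eq vals, hvals, List.foldl_map]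
  simp
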